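-- pv_equiv track=rewrite | github.com/rogermyung/cam-project | cam/analysis/merger_screener.py | _generate_review_focus
-- ===== SOURCE A (Python) =====
-- _REVIEW_PRIORITY: list[str] = [
--     "controls_bottleneck_input",
--     "price_setter_plus_competitor",
--     "payer_plus_provider",
--     "platform_plus_seller",
--     "prior_vertical_merger_same_firm",
--     "high_hhi_either_market",
-- ]
--
-- _REVIEW_FOCUS_TEXTS: dict[str, str] = {
--     "controls_bottleneck_input": (
--         "Priority: Assess whether the acquirer's control of a critical input will enable "
--         "it to foreclose competitors from the target's downstream market. Request "
--         "third-party dependency data and examine alternative supplier availability."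
--     ),
--     "price_setter_plus_competitor": (
--         "Priority: Examine whether post-merger the combined entity will have both the "
--         "ability and incentive to discriminate against downstream rivals through pricing "
--         "or reimbursement structures."
--     ),
--     "payer_plus_provider": (
--         "Priority: Assess payer-provider integration risk — the combined entity may "
--         "steer patients to in-network affiliates or disadvantage rival health plans "
--         "relying on the same provider or pharmacy network."
--     ),
--     "platform_plus_seller": (
--         "Priority: Review whether the marketplace operator will self-preference its "
--         "newly acquired seller over independent merchants on the platform."
--     ),
--     "prior_vertical_merger_same_firm": (
--         "Priority: Assess cumulative vertical integration effects. The acquirer's prior "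
--         "deals in this sector suggest a pattern of market foreclosure. Review all prior "
--         "consent decrees for compliance and consider structural remedies."
--     ),
--     "high_hhi_either_market": (
--         "Priority: Market concentration in at least one relevant market warrants detailed "
--         "HHI analysis. Consider entry barriers, switching costs, and coordinated effects."
--     ),
-- }
--
-- def _generate_review_focus(factors: list[str]) -> str:
--     """Return a plain-language regulatory review recommendation."""
--     if not factors:
--         return "Standard review; no vertical integration red flags detected."
--
--     top_factor = next(
--         (f for f in _REVIEW_PRIORITY if f in factors),
--         factors[0],
--     )
--     return _REVIEW_FOCUS_TEXTS.get(
--         top_factor,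
--         "Detailed vertical integration review recommended.",
--     )
-- ===== SOURCE B (Python) =====
-- _REVIEW_PRIORITY: list[str] = [
--     "controls_bottleneck_input",
--     "price_setter_plus_competitor",
--     "payer_plus_provider",
--     "platform_plus_seller",
--     "prior_vertical_merger_same_firm",
--     "high_hhi_either_market",
-- ]
--
-- _REVIEW_FOCUS_TEXTS: dict[str, str] = {
--     "controls_bottleneck_input": (
--         "Priority: Assess whether the acquirer's control of a critical input will enable "
--         "it to foreclose competitors from the target's downstream market. Request "
--         "third-party dependency data and examine alternative supplier availability."
--     ),
--     "price_setter_plus_competitor": (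
--         "Priority: Examine whether post-merger the combined entity will have both the "
--         "ability and incentive to discriminate against downstream rivals through pricing "
--         "or reimbursement structures."
--     ),
--     "payer_plus_provider": (
--         "Priority: Assess payer-provider integration risk — the combined entity may "
--         "steer patients to in-network affiliates or disadvantage rival health plans "
--         "relying on the same provider or pharmacy network."
--     ),
--     "platform_plus_seller": (
--         "Priority: Review whether the marketplace operator will self-preference its "
--         "newly acquired seller over independent merchants on the platform."
--     ),
--     "prior_vertical_merger_same_firm": (
--         "Priority: Assess cumulative vertical integration effects. The acquirer's prior "
--         "deals in this sector suggest a pattern of market foreclosure. Review all prior "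
--         "consent decrees for compliance and consider structural remedies."
--     ),
--     "high_hhi_either_market": (
--         "Priority: Market concentration in at least one relevant market warrants detailed "
--         "HHI analysis. Consider entry barriers, switching costs, and coordinated effects."
--     ),
-- }
--
-- _RANK: dict[str, int] = {f: i for i, f in enumerate(_REVIEW_PRIORITY)}
--
--
-- def _generate_review_focus(factors: list[str]) -> str:
--     """Return a plain-language regulatory review recommendation."""
--     if not factors:
--         return "Standard review; no vertical integration red flags detected."
--
--     top_factor = min(factors, key=lambda f: _RANK.get(f, len(_REVIEW_PRIORITY)))
--     return _REVIEW_FOCUS_TEXTS.get(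
--         top_factor,
--         "Detailed vertical integration review recommended.",
--     )
-- ===== Notes on version B (the rewrite author's own statement) =====
-- stated objective: alternative
-- what changed: B precomputes a rank table from the priority list and picks the top factor with a single min-by-rank scan over factors, instead of A's scan over the priority list with a membership test per priority.
import Mathlib
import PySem

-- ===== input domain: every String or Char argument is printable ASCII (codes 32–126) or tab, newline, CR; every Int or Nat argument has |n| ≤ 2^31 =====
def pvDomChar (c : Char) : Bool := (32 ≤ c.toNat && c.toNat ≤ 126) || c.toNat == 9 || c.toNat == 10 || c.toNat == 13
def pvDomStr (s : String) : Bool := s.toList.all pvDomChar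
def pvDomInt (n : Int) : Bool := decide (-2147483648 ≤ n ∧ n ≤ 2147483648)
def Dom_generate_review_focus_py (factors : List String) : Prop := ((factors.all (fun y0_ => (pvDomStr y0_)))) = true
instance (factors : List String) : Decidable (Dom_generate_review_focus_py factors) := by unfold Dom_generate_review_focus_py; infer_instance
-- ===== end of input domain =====

-- B selects the top factor by a min-by-rank scan over `factors` (rank table built once from the
-- priority list) instead of A's scan over the priority list with a membership test; same result.

-- shared module constants (same in Source A and Source B)
def pvPriority : List String :=
  ["controls_bottleneck_input",
   "price_setter_plus_competitor",
   "payer_plus_provider",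
   "platform_plus_seller",
   "prior_vertical_merger_same_firm",
   "high_hhi_either_market"]

def pvTexts : PySem.Dict String String := PySem.Dict.ofList
  [("controls_bottleneck_input",
    "Priority: Assess whether the acquirer's control of a critical input will enable it to foreclose competitors from the target's downstream market. Request third-party dependency data and examine alternative supplier availability."),
   ("price_setter_plus_competitor",
    "Priority: Examine whether post-merger the combined entity will have both the ability and incentive to discriminate against downstream rivals through pricing or reimbursement structures."),
   ("payer_plus_provider",
    "Priority: Assess payer-provider integration risk — the combined entity may steer patients to in-network affiliates or disadvantage rival health plans relying on the same provider or pharmacy network."),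
   ("platform_plus_seller",
    "Priority: Review whether the marketplace operator will self-preference its newly acquired seller over independent merchants on the platform."),
   ("prior_vertical_merger_same_firm",
    "Priority: Assess cumulative vertical integration effects. The acquirer's prior deals in this sector suggest a pattern of market foreclosure. Review all prior consent decrees for compliance and consider structural remedies."),
   ("high_hhi_either_market",
    "Priority: Market concentration in at least one relevant market warrants detailed HHI analysis. Consider entry barriers, switching costs, and coordinated effects.")]

-- ===== PORT A =====
def generate_review_focus_py (factors : List String) : String :=
  match factors with
  | [] => "Standard review; no vertical integration red flags detected."
  | f0 :: rest =>
    let top_factor := (pvPriority.find? (fun f => (f0 :: rest).contains f)).getD f0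
    pvTexts.getD top_factor "Detailed vertical integration review recommended."

-- ===== PORT B =====
-- _RANK = {f: i for i, f in enumerate(_REVIEW_PRIORITY)}
def pvRank : PySem.Dict String Int :=
  PySem.Dict.ofList ((PySem.List.enumerate pvPriority).map (fun p => (p.2, p.1)))

-- _RANK.get(f, len(_REVIEW_PRIORITY))
def pvRankOf (f : String) : Int := pvRank.getD f (pvPriority.length : Int)

def generate_review_focus_py_alt (factors : List String) : String :=
  match factors with
  | [] => "Standard review; no vertical integration red flags detected."
  | f0 :: rest =>
    -- min(factors, key=…): keep the first element whose rank is strictly smaller than the best so far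
    let top_factor := rest.foldl (fun acc x => if pvRankOf x < pvRankOf acc then x else acc) f0
    pvTexts.getD top_factor "Detailed vertical integration review recommended."

-- ===== PRECONDITION & SPEC =====
def Spec_generate_review_focus_py (factors : List String) (out : String) : Prop := out = generate_review_focus_py_alt factors
instance (factors : List String) (out : String) : Decidable (Spec_generate_review_focus_py factors out) := by unfold Spec_generate_review_focus_py; infer_instance

-- ===== CLAIM (what is proved, stated in full; the proofs are below) =====
def Claim_equal_generate_review_focus_py : Prop := ∀ (factors : List String), Dom_generate_review_focus_py factors → Spec_generate_review_focus_py factors (generate_review_focus_py factors)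

-- ===== LEMMAS AND PROOFS =====

def pvBest (rest : List String) (a : String) : String :=
  rest.foldl (fun acc x => if pvRankOf x < pvRankOf acc then x else acc) a

lemma pvBest_cons (x : String) (l : List String) (a : String) :
    pvBest (x :: l) a = pvBest l (if pvRankOf x < pvRankOf a then x else a) := rfl

lemma pvRank_mk : pvRank = PySem.Dict.mk
    [("controls_bottleneck_input", 0), ("price_setter_plus_competitor", 1),
     ("payer_plus_provider", 2), ("platform_plus_seller", 3),
     ("prior_vertical_merger_same_firm", 4), ("high_hhi_either_market", 5)] := by decide

lemma pvRankOf_eq (x : String) :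
    pvRankOf x =
      if x = "controls_bottleneck_input" then 0
      else if x = "price_setter_plus_competitor" then 1
      else if x = "payer_plus_provider" then 2
      else if x = "platform_plus_seller" then 3
      else if x = "prior_vertical_merger_same_firm" then 4
      else if x = "high_hhi_either_market" then 5
      else 6 := by
  simp only [pvRankOf, pvRank_mk, PySem.Dict.getD_eq_get?_getD, PySem.Dict.get?_mk_cons]
  split_ifs <;> simp_all <;> rfl

lemma rank_cases (x : String) :
    pvRankOf x = 6 ∨
    (pvRankOf x = 0 ∧ x = "controls_bottleneck_input") ∨
    (pvRankOf x = 1 ∧ x = "price_setter_plus_competitor") ∨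
    (pvRankOf x = 2 ∧ x = "payer_plus_provider") ∨
    (pvRankOf x = 3 ∧ x = "platform_plus_seller") ∨
    (pvRankOf x = 4 ∧ x = "prior_vertical_merger_same_firm") ∨
    (pvRankOf x = 5 ∧ x = "high_hhi_either_market") := by
  rw [pvRankOf_eq]; split_ifs <;> simp_all

lemma rank_inj (x y : String) (hx : pvRankOf x < 6) (h : pvRankOf x = pvRankOf y) : x = y := by
  rw [pvRankOf_eq] at hx h
  rw [pvRankOf_eq y] at h
  split_ifs at hx h <;> simp_all

lemma best_mem (rest : List String) (a : String) : pvBest rest a = a ∨ pvBest rest a ∈ rest := by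
  induction rest generalizing a with
  | nil => left; rfl
  | cons x l ih =>
    rw [pvBest_cons]
    rcases ih (if pvRankOf x < pvRankOf a then x else a) with h | h
    · rw [h]; split_ifs with hc
      · right; simp
      · left; rfl
    · right; simp [h]

lemma best_le (rest : List String) (a : String) : pvRankOf (pvBest rest a) ≤ pvRankOf a := by
  induction rest generalizing a with
  | nil => simp [pvBest]
  | cons x l ih =>
    rw [pvBest_cons]
    by_cases hc : pvRankOf x < pvRankOf a
    · rw [if_pos hc]; exact (ih x).trans hc.le
    · rw [if_neg hc]; exact ih a

lemma best_le_mem (rest : List String) (a x : String) (hx : x ∈ rest) :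
    pvRankOf (pvBest rest a) ≤ pvRankOf x := by
  induction rest generalizing a with
  | nil => cases hx
  | cons y l ih =>
    rw [pvBest_cons]
    rcases List.mem_cons.mp hx with h | h
    · subst h
      by_cases hc : pvRankOf x < pvRankOf a
      · rw [if_pos hc]; exact best_le l x
      · rw [if_neg hc]; exact (best_le l a).trans (not_lt.mp hc)
    · exact ih (if pvRankOf y < pvRankOf a then y else a) h

lemma best_le_mem' (rest : List String) (f0 x : String) (hx : x ∈ f0 :: rest) :
    pvRankOf (pvBest rest f0) ≤ pvRankOf x := by
  rcases List.mem_cons.mp hx with h | h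
  · subst h; exact best_le rest x
  · exact best_le_mem rest f0 x h

lemma best_eq (p f0 : String) (rest : List String)
    (hp : p ∈ f0 :: rest)
    (hlow : ∀ x ∈ f0 :: rest, pvRankOf p ≤ pvRankOf x)
    (hlt : pvRankOf p < 6) :
    pvBest rest f0 = p := by
  have hle : pvRankOf (pvBest rest f0) ≤ pvRankOf p := best_le_mem' rest f0 p hp
  have hmem : pvBest rest f0 ∈ f0 :: rest := by
    rcases best_mem rest f0 with h | h
    · rw [h]; simp
    · exact List.mem_cons_of_mem _ h
  have hge : pvRankOf p ≤ pvRankOf (pvBest rest f0) := hlow _ hmem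
  exact (rank_inj p _ hlt (le_antisymm hge hle)).symm

lemma best_stable (rest : List String) (f0 : String)
    (h : ∀ x ∈ rest, pvRankOf f0 ≤ pvRankOf x) : pvBest rest f0 = f0 := by
  induction rest with
  | nil => rfl
  | cons x l ih =>
    rw [pvBest_cons, if_neg (not_lt.mpr (h x (by simp)))]
    exact ih (fun y hy => h y (List.mem_cons_of_mem _ hy))

lemma top_eq (f0 : String) (rest : List String) :
    pvBest rest f0 = (pvPriority.find? (fun f => (f0 :: rest).contains f)).getD f0 := by
  by_cases h0 : "controls_bottleneck_input" ∈ f0 :: rest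
  · have := best_eq "controls_bottleneck_input" f0 rest h0
      (fun x hx => by rcases rank_cases x with h | ⟨h, hx'⟩ | ⟨h, hx'⟩ | ⟨h, hx'⟩ | ⟨h, hx'⟩ | ⟨h, hx'⟩ | ⟨h, hx'⟩ <;>
        (rw [h]; decide)) (by decide)
    have b0 : (decide ("controls_bottleneck_input" = f0) || decide ("controls_bottleneck_input" ∈ rest)) = true := by
      rcases List.mem_cons.mp h0 with h | h <;> simp [h]
    simp [pvPriority, b0, this]
  all_goals by_cases h1 : "price_setter_plus_competitor" ∈ f0 :: rest
  · have := best_eq "price_setter_plus_competitor" f0 rest h1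
      (fun x hx => by rcases rank_cases x with h | ⟨h, hx'⟩ | ⟨h, hx'⟩ | ⟨h, hx'⟩ | ⟨h, hx'⟩ | ⟨h, hx'⟩ | ⟨h, hx'⟩ <;>
        first
        | (subst hx'; exact absurd hx h0)
        | (rw [h]; decide)) (by decide)
    have b0 : (decide ("controls_bottleneck_input" = f0) || decide ("controls_bottleneck_input" ∈ rest)) = false := by
      simp only [List.mem_cons, not_or] at h0
      simp [h0.1, h0.2]
    have b1 : (decide ("price_setter_plus_competitor" = f0) || decide ("price_setter_plus_competitor" ∈ rest)) = true := by
      rcases List.mem_cons.mp h1 with h | h <;> simp [h]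
    simp [pvPriority, List.find?, b0, b1, this]
  all_goals by_cases h2 : "payer_plus_provider" ∈ f0 :: rest
  · have := best_eq "payer_plus_provider" f0 rest h2
      (fun x hx => by rcases rank_cases x with h | ⟨h, hx'⟩ | ⟨h, hx'⟩ | ⟨h, hx'⟩ | ⟨h, hx'⟩ | ⟨h, hx'⟩ | ⟨h, hx'⟩ <;>
        first
        | (subst hx'; exact absurd hx h0)
        | (subst hx'; exact absurd hx h1)
        | (rw [h]; decide)) (by decide)
    have b0 : (decide ("controls_bottleneck_input" = f0) || decide ("controls_bottleneck_input" ∈ rest)) = false := by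
      simp only [List.mem_cons, not_or] at h0
      simp [h0.1, h0.2]
    have b1 : (decide ("price_setter_plus_competitor" = f0) || decide ("price_setter_plus_competitor" ∈ rest)) = false := by
      simp only [List.mem_cons, not_or] at h1
      simp [h1.1, h1.2]
    have b2 : (decide ("payer_plus_provider" = f0) || decide ("payer_plus_provider" ∈ rest)) = true := by
      rcases List.mem_cons.mp h2 with h | h <;> simp [h]
    simp [pvPriority, List.find?, b0, b1, b2, this]
  all_goals by_cases h3 : "platform_plus_seller" ∈ f0 :: rest
  · have := best_eq "platform_plus_seller" f0 rest h3
      (fun x hx => by rcases rank_cases x with h | ⟨h, hx'⟩ | ⟨h, hx'⟩ | ⟨h, hx'⟩ | ⟨h, hx'⟩ | ⟨h, hx'⟩ | ⟨h, hx'⟩ <;>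
        first
        | (subst hx'; exact absurd hx h0)
        | (subst hx'; exact absurd hx h1)
        | (subst hx'; exact absurd hx h2)
        | (rw [h]; decide)) (by decide)
    have b0 : (decide ("controls_bottleneck_input" = f0) || decide ("controls_bottleneck_input" ∈ rest)) = false := by
      simp only [List.mem_cons, not_or] at h0
      simp [h0.1, h0.2]
    have b1 : (decide ("price_setter_plus_competitor" = f0) || decide ("price_setter_plus_competitor" ∈ rest)) = false := by
      simp only [List.mem_cons, not_or] at h1
      simp [h1.1, h1.2]
    have b2 : (decide ("payer_plus_provider" = f0) || decide ("payer_plus_provider" ∈ rest)) = false := by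
      simp only [List.mem_cons, not_or] at h2
      simp [h2.1, h2.2]
    have b3 : (decide ("platform_plus_seller" = f0) || decide ("platform_plus_seller" ∈ rest)) = true := by
      rcases List.mem_cons.mp h3 with h | h <;> simp [h]
    simp [pvPriority, List.find?, b0, b1, b2, b3, this]
  all_goals by_cases h4 : "prior_vertical_merger_same_firm" ∈ f0 :: rest
  · have := best_eq "prior_vertical_merger_same_firm" f0 rest h4
      (fun x hx => by rcases rank_cases x with h | ⟨h, hx'⟩ | ⟨h, hx'⟩ | ⟨h, hx'⟩ | ⟨h, hx'⟩ | ⟨h, hx'⟩ | ⟨h, hx'⟩ <;>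
        first
        | (subst hx'; exact absurd hx h0)
        | (subst hx'; exact absurd hx h1)
        | (subst hx'; exact absurd hx h2)
        | (subst hx'; exact absurd hx h3)
        | (rw [h]; decide)) (by decide)
    have b0 : (decide ("controls_bottleneck_input" = f0) || decide ("controls_bottleneck_input" ∈ rest)) = false := by
      simp only [List.mem_cons, not_or] at h0
      simp [h0.1, h0.2]
    have b1 : (decide ("price_setter_plus_competitor" = f0) || decide ("price_setter_plus_competitor" ∈ rest)) = false := by
      simp only [List.mem_cons, not_or] at h1
      simp [h1.1, h1.2]
    have b2 : (decide ("payer_plus_provider" = f0) || decide ("payer_plus_provider" ∈ rest)) = false := by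
      simp only [List.mem_cons, not_or] at h2
      simp [h2.1, h2.2]
    have b3 : (decide ("platform_plus_seller" = f0) || decide ("platform_plus_seller" ∈ rest)) = false := by
      simp only [List.mem_cons, not_or] at h3
      simp [h3.1, h3.2]
    have b4 : (decide ("prior_vertical_merger_same_firm" = f0) || decide ("prior_vertical_merger_same_firm" ∈ rest)) = true := by
      rcases List.mem_cons.mp h4 with h | h <;> simp [h]
    simp [pvPriority, List.find?, b0, b1, b2, b3, b4, this]
  all_goals by_cases h5 : "high_hhi_either_market" ∈ f0 :: rest
  · have := best_eq "high_hhi_either_market" f0 rest h5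
      (fun x hx => by rcases rank_cases x with h | ⟨h, hx'⟩ | ⟨h, hx'⟩ | ⟨h, hx'⟩ | ⟨h, hx'⟩ | ⟨h, hx'⟩ | ⟨h, hx'⟩ <;>
        first
        | (subst hx'; exact absurd hx h0)
        | (subst hx'; exact absurd hx h1)
        | (subst hx'; exact absurd hx h2)
        | (subst hx'; exact absurd hx h3)
        | (subst hx'; exact absurd hx h4)
        | (rw [h]; decide)) (by decide)
    have b0 : (decide ("controls_bottleneck_input" = f0) || decide ("controls_bottleneck_input" ∈ rest)) = false := by
      simp only [List.mem_cons, not_or] at h0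
      simp [h0.1, h0.2]
    have b1 : (decide ("price_setter_plus_competitor" = f0) || decide ("price_setter_plus_competitor" ∈ rest)) = false := by
      simp only [List.mem_cons, not_or] at h1
      simp [h1.1, h1.2]
    have b2 : (decide ("payer_plus_provider" = f0) || decide ("payer_plus_provider" ∈ rest)) = false := by
      simp only [List.mem_cons, not_or] at h2
      simp [h2.1, h2.2]
    have b3 : (decide ("platform_plus_seller" = f0) || decide ("platform_plus_seller" ∈ rest)) = false := by
      simp only [List.mem_cons, not_or] at h3
      simp [h3.1, h3.2]
    have b4 : (decide ("prior_vertical_merger_same_firm" = f0) || decide ("prior_vertical_merger_same_firm" ∈ rest)) = false := by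
      simp only [List.mem_cons, not_or] at h4
      simp [h4.1, h4.2]
    have b5 : (decide ("high_hhi_either_market" = f0) || decide ("high_hhi_either_market" ∈ rest)) = true := by
      rcases List.mem_cons.mp h5 with h | h <;> simp [h]
    simp [pvPriority, List.find?, b0, b1, b2, b3, b4, b5, this]
  · have hbs : pvBest rest f0 = f0 := best_stable rest f0
      (fun x hx => by
        rcases rank_cases x with h | ⟨h, hx'⟩ | ⟨h, hx'⟩ | ⟨h, hx'⟩ | ⟨h, hx'⟩ | ⟨h, hx'⟩ | ⟨h, hx'⟩
        · rw [h]
          rcases rank_cases f0 with h' | ⟨h', _⟩ | ⟨h', _⟩ | ⟨h', _⟩ | ⟨h', _⟩ | ⟨h', _⟩ | ⟨h', _⟩ <;> omega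
        all_goals
          subst hx'
          first
          | exact absurd (List.mem_cons_of_mem _ hx) h0
          | exact absurd (List.mem_cons_of_mem _ hx) h1
          | exact absurd (List.mem_cons_of_mem _ hx) h2
          | exact absurd (List.mem_cons_of_mem _ hx) h3
          | exact absurd (List.mem_cons_of_mem _ hx) h4
          | exact absurd (List.mem_cons_of_mem _ hx) h5)
    have b0 : (decide ("controls_bottleneck_input" = f0) || decide ("controls_bottleneck_input" ∈ rest)) = false := by
      simp only [List.mem_cons, not_or] at h0
      simp [h0.1, h0.2]
    have b1 : (decide ("price_setter_plus_competitor" = f0) || decide ("price_setter_plus_competitor" ∈ rest)) = false := by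
      simp only [List.mem_cons, not_or] at h1
      simp [h1.1, h1.2]
    have b2 : (decide ("payer_plus_provider" = f0) || decide ("payer_plus_provider" ∈ rest)) = false := by
      simp only [List.mem_cons, not_or] at h2
      simp [h2.1, h2.2]
    have b3 : (decide ("platform_plus_seller" = f0) || decide ("platform_plus_seller" ∈ rest)) = false := by
      simp only [List.mem_cons, not_or] at h3
      simp [h3.1, h3.2]
    have b4 : (decide ("prior_vertical_merger_same_firm" = f0) || decide ("prior_vertical_merger_same_firm" ∈ rest)) = false := by
      simp only [List.mem_cons, not_or] at h4
      simp [h4.1, h4.2]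
    have b5 : (decide ("high_hhi_either_market" = f0) || decide ("high_hhi_either_market" ∈ rest)) = false := by
      simp only [List.mem_cons, not_or] at h5
      simp [h5.1, h5.2]
    simp [pvPriority, List.find?, b0, b1, b2, b3, b4, b5, hbs]

-- ===== VERDICT (by name: the statement is the Claim_ definition above) =====
theorem generate_review_focus_py_spec : Claim_equal_generate_review_focus_py := by
  intro factors _
  unfold Spec_generate_review_focus_py generate_review_focus_py generate_review_focus_py_alt
  cases factors with
  | nil => rfl
  | cons f0 rest =>
    simp only
    rw [show (rest.foldl (fun acc x => if pvRankOf x < pvRankOf acc then x else acc) f0) = pvBest rest f0 from rfl,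
      top_eq]
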